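-- pv_equiv track=rewrite | github.com/pypi-data/pypi-mirror-403 | packages/logsage/logsage-0.1.5-py3-none-any.whl/logsage/auto_resume_policy/utils.py | filter_early_errors
-- ===== SOURCE A (Python) =====
-- from collections import Counter, defaultdict, deque
-- import bisect
--
-- def count_intervals_with_pattern(main_indices: list, patterns_dict: dict) -> dict:
--     """Count intervals,
--
--     Args:
--         main_indices: [list_of_indices]
--         patterns_dict: dict
--
--     Returns:
--         results: dict
--     """
--     # 1. Sort the main list to ensure intervals are sequential
--     main_indices.sort()
--
--     # Dictionary to store final counts for each pattern
--     results = dict.fromkeys(patterns_dict, 0)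
--
--     # 2. Iterate through sequential pairs (intervals) in the main list
--     # If list is [10, 50, 100], loops over (10, 50) then (50, 100)
--     for i in range(len(main_indices) - 1):
--         start = main_indices[i]
--         end = main_indices[i + 1]
--
--         # 3. Check each pattern against this current interval
--         for name, pattern_indices in patterns_dict.items():
--             # Ensure pattern list is sorted for binary search to work
--             # (If your data is already sorted, you can remove this sort to save time)
--             pattern_indices.sort()
--
--             # Find the first index in pattern that is > start
--             left_idx = bisect.bisect_right(pattern_indices, start)
--
--             # Find the first index in pattern that is >= end
--             right_idx = bisect.bisect_left(pattern_indices, end)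
--
--             # If left_idx < right_idx, it means there is at least one number
--             # in the pattern strictly between start and end.
--             if left_idx < right_idx:
--                 results[name] += 1
--
--     return results
--
-- def filter_early_errors(error_tuples: list, iteration_indices: list) -> dict:
--     """Converts error tuples to a dict and filters for patterns that occur
--     before the iteration sequence ends.
--
--     Args:
--         error_tuples: List of (error_message, error_pattern, index)
--         iteration_indices: List of integers for iteration steps.
--
--     Returns:
--         filtered_result: dict
--     """
--     if not iteration_indices:
--         return {}
--
--     # 1. Convert Tuple to Dict
--     # key: error_pattern, value: list of indices
--     error_map = defaultdict(list)
--     for _, pattern, idx in error_tuples: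
--         error_map[pattern].append(idx)
--
--     filtered_result = count_intervals_with_pattern(iteration_indices, error_map)
--
--     return filtered_result
-- ===== SOURCE B (Python) =====
-- import bisect
--
-- def filter_early_errors(error_tuples: list, iteration_indices: list) -> dict:
--     """Same result as A, computed per error index: sort the iteration indices
--     once, locate each error index's enclosing interval by one binary search,
--     and count the distinct intervals hit per pattern.  (A mutates its list
--     arguments by sorting them in place; B does not — return value is equal.)"""
--     if not iteration_indices:
--         return {}
--     m = sorted(iteration_indices)
--     n = len(m)
--     slots = {}
--     for _, pattern, idx in error_tuples:
--         s = slots.setdefault(pattern, set())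
--         i = bisect.bisect_left(m, idx)
--         if 0 < i < n and m[i] != idx:
--             s.add(i - 1)
--     return {p: len(s) for p, s in slots.items()}
-- ===== Notes on version B (the rewrite author's own statement) =====
-- stated objective: faster
-- what changed: Instead of scanning every (interval, pattern) pair and re-sorting each pattern list inside the interval loop, B sorts the iteration indices once, binary-searches each error index into its enclosing interval, and counts distinct interval slots per pattern with a set.
import Mathlib
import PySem

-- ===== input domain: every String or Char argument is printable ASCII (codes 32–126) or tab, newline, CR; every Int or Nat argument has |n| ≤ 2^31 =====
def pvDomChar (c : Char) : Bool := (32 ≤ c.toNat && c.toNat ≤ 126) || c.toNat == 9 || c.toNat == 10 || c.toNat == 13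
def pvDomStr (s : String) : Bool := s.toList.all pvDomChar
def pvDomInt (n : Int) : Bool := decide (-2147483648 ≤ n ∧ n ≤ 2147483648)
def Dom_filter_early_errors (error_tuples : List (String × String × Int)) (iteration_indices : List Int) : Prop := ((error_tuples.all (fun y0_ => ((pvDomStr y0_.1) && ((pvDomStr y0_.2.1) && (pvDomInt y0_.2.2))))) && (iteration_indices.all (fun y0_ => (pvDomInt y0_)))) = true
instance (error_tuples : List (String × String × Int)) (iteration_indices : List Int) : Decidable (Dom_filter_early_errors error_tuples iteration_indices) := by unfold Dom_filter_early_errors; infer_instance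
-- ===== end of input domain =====

-- B replaces A's per-interval × per-pattern scan (with a sort inside the interval loop)
-- by one sort of the iteration indices plus one binary search per error index, counting
-- distinct enclosing intervals per pattern with a set (objective: faster).
-- NOTE on side effects: Python A sorts `iteration_indices` and the pattern lists in
-- place; B does not mutate its arguments. The equivalence proved here is about the
-- RETURN value only.

-- ===== PORT A =====
-- helper used by A; Python's in-place `list.sort()` is read back as the list's
-- sorted value (only the sorted value is used afterwards; re-sorting an already
-- sorted list is the identity, so the local `let p := sorted …` is exact).
def count_intervals_with_pattern (main_indices : List Int) (patterns_dict : PySem.Dict String (List Int)) : PySem.Dict String Int :=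
  let m := PySem.List.sorted main_indices (fun x => x)
  -- results = dict.fromkeys(patterns_dict, 0)
  let results : PySem.Dict String Int :=
    patterns_dict.keys.foldl (fun d k => d.insert k 0) PySem.Dict.empty
  -- for i in range(len(main_indices) - 1): …
  (List.range (m.length - 1)).foldl (fun results (i : Nat) =>
    let start := PySem.List.pyGetD m (i : Int) 0
    let stop := PySem.List.pyGetD m ((i : Int) + 1) 0
    -- for name, pattern_indices in patterns_dict.items(): …
    patterns_dict.items.foldl (fun results pr =>
      let p := PySem.List.sorted pr.2 (fun x => x)
      let left_idx := PySem.List.bisectRight p start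
      let right_idx := PySem.List.bisectLeft p stop
      if left_idx < right_idx then results.modify pr.1 0 (· + 1) else results)
      results)
    results

def filter_early_errors (error_tuples : List (String × String × Int)) (iteration_indices : List Int) : List (String × Int) :=
  if iteration_indices = [] then []
  else
    -- error_map = defaultdict(list); for _, pattern, idx in error_tuples: error_map[pattern].append(idx)
    let error_map : PySem.Dict String (List Int) :=
      error_tuples.foldl (fun d t => d.modify t.2.1 [] (fun l => l ++ [t.2.2])) PySem.Dict.empty
    (count_intervals_with_pattern iteration_indices error_map).items

-- ===== PORT B =====
def filter_early_errors_alt (error_tuples : List (String × String × Int)) (iteration_indices : List Int) : List (String × Int) :=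
  if iteration_indices = [] then []
  else
    let m := PySem.List.sorted iteration_indices (fun x => x)
    let n := m.length
    -- slots: pattern -> set of interval slots hit by that pattern's error indices
    let slots : PySem.Dict String (PySem.Set Nat) :=
      error_tuples.foldl (fun d t =>
        let d := d.setdefault t.2.1 PySem.Set.empty
        let i := PySem.List.bisectLeft m t.2.2
        if 0 < i ∧ i < n ∧ PySem.List.pyGetD m (i : Int) 0 ≠ t.2.2 then
          d.modify t.2.1 PySem.Set.empty (fun s => PySem.Set.add s (i - 1))
        else d) PySem.Dict.empty
    slots.items.map (fun pr => (pr.1, PySem.Set.len pr.2))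

-- ===== PRECONDITION & SPEC =====
def Spec_filter_early_errors (error_tuples : List (String × String × Int)) (iteration_indices : List Int) (out : List (String × Int)) : Prop := out = filter_early_errors_alt error_tuples iteration_indices
instance (error_tuples : List (String × String × Int)) (iteration_indices : List Int) (out : List (String × Int)) : Decidable (Spec_filter_early_errors error_tuples iteration_indices out) := by unfold Spec_filter_early_errors; infer_instance

-- ===== CLAIM (what is proved, stated in full; the proofs are below) =====
def Claim_equal_filter_early_errors : Prop := ∀ (error_tuples : List (String × String × Int)) (iteration_indices : List Int), Dom_filter_early_errors error_tuples iteration_indices → Spec_filter_early_errors error_tuples iteration_indices (filter_early_errors error_tuples iteration_indices)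

-- ===== LEMMAS AND PROOFS =====
theorem pv_getD_setdefault_of_ne {ν : Type} (d : PySem.Dict String ν) (k k' : String) (v d0 : ν)
    (h : k' ≠ k) : (d.setdefault k v).getD k' d0 = d.getD k' d0 := by
  unfold PySem.Dict.setdefault
  split
  · rfl
  · simp [PySem.Dict.getD, PySem.Dict.get?, List.find?_append, Ne.symm h]

theorem pv_keys_modify {ν : Type} (d : PySem.Dict String ν) (k : String) (d0 : ν) (f : ν → ν) :
    (d.modify k d0 f).keys = PySem.Set.add d.keys k := by
  simpa [PySem.Set.update_cons, PySem.Set.update_nil] using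
    PySem.Dict.keys_foldl_modify_key [()] (fun _ => k) d0 (fun _ _ => f) d

theorem pv_keys_setdefault_add {ν : Type} (d : PySem.Dict String ν) (k : String) (v : ν) :
    (d.setdefault k v).keys = PySem.Set.add d.keys k := by
  rw [PySem.Dict.keys_setdefault, PySem.Set.add_eq_ite, PySem.Dict.contains_eq_decide_mem_keys]
  by_cases h : k ∈ d.keys <;> simp [h]

def pvSlotF (m : List Int) (x : Int) : Option Nat :=
  let i := PySem.List.bisectLeft m x
  if 0 < i ∧ i < m.length ∧ PySem.List.pyGetD m (i : Int) 0 ≠ x then some (i - 1) else none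

theorem pv_bslots_keys (m : List Int) (ets : List (String × String × Int)) :
    ∀ d : PySem.Dict String (PySem.Set Nat),
    (ets.foldl (fun d t =>
        let d := d.setdefault t.2.1 PySem.Set.empty
        let i := PySem.List.bisectLeft m t.2.2
        if 0 < i ∧ i < m.length ∧ PySem.List.pyGetD m (i : Int) 0 ≠ t.2.2 then
          d.modify t.2.1 PySem.Set.empty (fun s => PySem.Set.add s (i - 1))
        else d) d).keys
      = PySem.Set.update d.keys (ets.map (fun t => t.2.1)) := by
  induction ets with
  | nil => intro d; simp [PySem.Set.update_nil]
  | cons t ts ih =>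
    obtain ⟨a, b, c⟩ := t
    intro d
    simp only [List.foldl_cons, List.map_cons, PySem.Set.update_cons]
    rw [ih]
    congr 1
    by_cases hc : 0 < PySem.List.bisectLeft m c ∧ PySem.List.bisectLeft m c < m.length ∧
        PySem.List.pyGetD m (PySem.List.bisectLeft m c : Int) 0 ≠ c
    · rw [if_pos hc]
      rw [pv_keys_modify, pv_keys_setdefault_add]
      rw [PySem.Set.add_of_mem]
      · exact (PySem.Set.mem_add _ _ _).2 (Or.inr rfl)
    · rw [if_neg hc]
      rw [pv_keys_setdefault_add]

theorem pv_bslots_getD (m : List Int) (ets : List (String × String × Int)) (k : String) :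
    ∀ d : PySem.Dict String (PySem.Set Nat),
    (ets.foldl (fun d t =>
        let d := d.setdefault t.2.1 PySem.Set.empty
        let i := PySem.List.bisectLeft m t.2.2
        if 0 < i ∧ i < m.length ∧ PySem.List.pyGetD m (i : Int) 0 ≠ t.2.2 then
          d.modify t.2.1 PySem.Set.empty (fun s => PySem.Set.add s (i - 1))
        else d) d).getD k PySem.Set.empty
      = PySem.Set.update (d.getD k PySem.Set.empty)
          (((ets.filter (fun t => t.2.1 == k)).map (fun t => t.2.2)).filterMap (pvSlotF m)) := by
  induction ets with
  | nil => intro d; simp [PySem.Set.update_nil]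
  | cons t ts ih =>
    obtain ⟨a, b, c⟩ := t
    intro d
    simp only [List.foldl_cons, List.filter_cons]
    by_cases hb : b = k
    · subst hb
      simp only [BEq.rfl, if_pos, List.map_cons, List.filterMap_cons]
      by_cases hc : 0 < PySem.List.bisectLeft m c ∧ PySem.List.bisectLeft m c < m.length ∧
          PySem.List.pyGetD m (PySem.List.bisectLeft m c : Int) 0 ≠ c
      · have hslot : pvSlotF m c = some (PySem.List.bisectLeft m c - 1) := by
          unfold pvSlotF
          rw [if_pos hc]
        rw [hslot]
        rw [if_pos hc]
        rw [ih, PySem.Dict.getD_modify_self, PySem.Dict.getD_setdefault_self,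
            PySem.Set.update_cons]
      · have hslot : pvSlotF m c = none := by
          unfold pvSlotF
          rw [if_neg hc]
        rw [hslot]
        rw [if_neg hc]
        rw [ih, PySem.Dict.getD_setdefault_self]
    · have hbeq : (b == k) = false := by simpa using hb
      simp only [hbeq, Bool.false_eq_true, if_neg, not_false_iff]
      by_cases hc : 0 < PySem.List.bisectLeft m c ∧ PySem.List.bisectLeft m c < m.length ∧
          PySem.List.pyGetD m (PySem.List.bisectLeft m c : Int) 0 ≠ c
      · rw [if_pos hc]
        rw [ih, PySem.Dict.getD_modify_of_ne _ _ _ (Ne.symm hb),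
            pv_getD_setdefault_of_ne _ _ _ _ _ (Ne.symm hb)]
      · rw [if_neg hc]
        rw [ih, pv_getD_setdefault_of_ne _ _ _ _ _ (Ne.symm hb)]

theorem pv_emap_getD (ets : List (String × String × Int)) (k : String) :
    ∀ d : PySem.Dict String (List Int),
    (ets.foldl (fun d t => d.modify t.2.1 [] (fun l => l ++ [t.2.2])) d).getD k []
      = d.getD k [] ++ (ets.filter (fun t => t.2.1 == k)).map (fun t => t.2.2) := by
  induction ets with
  | nil => intro d; simp
  | cons t ts ih =>
    obtain ⟨a, b, c⟩ := t
    intro d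
    simp only [List.foldl_cons, List.filter_cons]
    by_cases h : b = k
    · subst h
      rw [ih]
      simp [PySem.Dict.getD_modify_self]
    · rw [ih, PySem.Dict.getD_modify_of_ne _ _ _ (Ne.symm h)]
      simp [h]

theorem pv_init_getD (ks : List String) (k : String) :
    ∀ d : PySem.Dict String Int, (∀ k', d.getD k' 0 = 0) →
    (ks.foldl (fun d k' => d.insert k' (0 : Int)) d).getD k 0 = 0 := by
  induction ks with
  | nil => intro d h; simpa using h k
  | cons a ks ih =>
    intro d h
    simp only [List.foldl_cons]
    refine ih _ (fun k' => ?_)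
    by_cases hk : k' = a
    · subst hk; simp [PySem.Dict.getD_insert_self]
    · rw [PySem.Dict.getD_insert_of_ne _ _ _ hk]; exact h k'

theorem pv_countP_nodup (l : List String) (k : String) (q : String → Bool)
    (hnd : l.Nodup) (hk : k ∈ l) :
    l.countP (fun a => a == k && q a) = if q k then 1 else 0 := by
  induction l with
  | nil => cases hk
  | cons a l ih =>
    rw [List.countP_cons]
    rcases List.mem_cons.1 hk with h | h
    · subst h
      have hz : l.countP (fun x => x == k && q x) = 0 := by
        rw [List.countP_eq_zero]
        intro x hx
        have : x ≠ k := fun he => (List.nodup_cons.1 hnd).1 (he ▸ hx)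
        simp [this]
      rw [hz]
      by_cases hq : q k <;> simp [hq]
    · have hna : a ≠ k := fun he => (List.nodup_cons.1 hnd).1 (he ▸ h)
      rw [ih (List.nodup_cons.1 hnd).2 h]
      simp [hna]

theorem pv_innerA (ps : List (String × List Int)) (s e : Int) (k : String) :
    ∀ res : PySem.Dict String Int,
    (ps.foldl (fun results pr =>
        if PySem.List.bisectRight (PySem.List.sorted pr.2 (fun x => x)) s <
           PySem.List.bisectLeft (PySem.List.sorted pr.2 (fun x => x)) e then
          results.modify pr.1 0 (· + 1)
        else results) res).getD k 0
      = res.getD k 0 + (ps.countP (fun pr => pr.1 == k &&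
          decide (PySem.List.bisectRight (PySem.List.sorted pr.2 (fun x => x)) s <
                  PySem.List.bisectLeft (PySem.List.sorted pr.2 (fun x => x)) e)) : Int) := by
  induction ps with
  | nil => intro res; simp
  | cons pr ps ih =>
    obtain ⟨nm, L⟩ := pr
    intro res
    simp only [List.foldl_cons, List.countP_cons]
    by_cases hc : PySem.List.bisectRight (PySem.List.sorted L (fun x => x)) s <
        PySem.List.bisectLeft (PySem.List.sorted L (fun x => x)) e
    · rw [if_pos hc]
      rw [ih]
      by_cases hk : nm = k
      · subst hk
        rw [PySem.Dict.getD_modify_self]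
        simp [hc]
        omega
      · rw [PySem.Dict.getD_modify_of_ne _ _ _ (Ne.symm hk)]
        have : (nm == k) = false := by simpa using hk
        simp [this]
    · rw [if_neg hc]
      rw [ih]
      have : decide (PySem.List.bisectRight (PySem.List.sorted L (fun x => x)) s <
                  PySem.List.bisectLeft (PySem.List.sorted L (fun x => x)) e) = false := by
        simpa using hc
      simp [this]

theorem pv_outerA (m : List Int) (ps : List (String × List Int)) (k : String) :
    ∀ (l : List Nat) (res : PySem.Dict String Int),
    (l.foldl (fun results (i : Nat) =>
        ps.foldl (fun results pr =>
          if PySem.List.bisectRight (PySem.List.sorted pr.2 (fun x => x)) (PySem.List.pyGetD m (i : Int) 0) <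
             PySem.List.bisectLeft (PySem.List.sorted pr.2 (fun x => x)) ((PySem.List.pyGetD m ((i : Int) + 1) 0)) then
            results.modify pr.1 0 (· + 1)
          else results) results) res).getD k 0
      = res.getD k 0 + (l.map (fun (i : Nat) => (ps.countP (fun pr => pr.1 == k &&
          decide (PySem.List.bisectRight (PySem.List.sorted pr.2 (fun x => x)) (PySem.List.pyGetD m (i : Int) 0) <
                  PySem.List.bisectLeft (PySem.List.sorted pr.2 (fun x => x)) ((PySem.List.pyGetD m ((i : Int) + 1) 0)))) : Int))).sum := by
  intro l
  induction l with
  | nil => intro res; simp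
  | cons i l ih =>
    intro res
    rw [List.foldl_cons, ih, pv_innerA, List.map_cons, List.sum_cons]
    ring

theorem pv_innerA_keys (ps : List (String × List Int)) (s e : Int) :
    ∀ res : PySem.Dict String Int, (∀ pr ∈ ps, pr.1 ∈ res.keys) →
    (ps.foldl (fun results pr =>
        if PySem.List.bisectRight (PySem.List.sorted pr.2 (fun x => x)) s <
           PySem.List.bisectLeft (PySem.List.sorted pr.2 (fun x => x)) e then
          results.modify pr.1 0 (· + 1)
        else results) res).keys = res.keys := by
  induction ps with
  | nil => intro res _; rfl
  | cons pr ps ih =>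
    intro res h
    simp only [List.foldl_cons]
    by_cases hc : PySem.List.bisectRight (PySem.List.sorted pr.2 (fun x => x)) s <
        PySem.List.bisectLeft (PySem.List.sorted pr.2 (fun x => x)) e
    · rw [if_pos hc]
      have hkeys : (res.modify pr.1 0 (· + 1)).keys = res.keys := by
        rw [pv_keys_modify]
        exact PySem.Set.add_of_mem (h pr (List.mem_cons_self ..))
      rw [ih _ (fun q hq => by rw [hkeys]; exact h q (List.mem_cons_of_mem _ hq))]
      exact hkeys
    · rw [if_neg hc]
      exact ih _ (fun q hq => h q (List.mem_cons_of_mem _ hq))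

theorem pv_outerA_keys (m : List Int) (ps : List (String × List Int)) :
    ∀ (l : List Nat) (res : PySem.Dict String Int), (∀ pr ∈ ps, pr.1 ∈ res.keys) →
    (l.foldl (fun results (i : Nat) =>
        ps.foldl (fun results pr =>
          if PySem.List.bisectRight (PySem.List.sorted pr.2 (fun x => x)) (PySem.List.pyGetD m (i : Int) 0) <
             PySem.List.bisectLeft (PySem.List.sorted pr.2 (fun x => x)) ((PySem.List.pyGetD m ((i : Int) + 1) 0)) then
            results.modify pr.1 0 (· + 1)
          else results) results) res).keys = res.keys := by
  intro l
  induction l with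
  | nil => intro res _; rfl
  | cons i l ih =>
    intro res h
    rw [List.foldl_cons]
    have hk := pv_innerA_keys ps (PySem.List.pyGetD m (i : Int) 0) (PySem.List.pyGetD m ((i : Int) + 1) 0) res h
    rw [ih _ (fun q hq => by rw [hk]; exact h q hq)]
    exact hk

theorem pv_condA_iff (L : List Int) (s e : Int) :
    (PySem.List.bisectRight (PySem.List.sorted L (fun x => x)) s <
     PySem.List.bisectLeft (PySem.List.sorted L (fun x => x)) e)
    ↔ ∃ x ∈ L, s < x ∧ x < e := by
  set sL := PySem.List.sorted L (fun x => x) with hsL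
  have hp : sL.Pairwise (· ≤ ·) := by
    simpa using PySem.List.sorted_pairwise L (fun x => x)
  obtain ⟨hr_le, hr_lt, hr_ge⟩ := PySem.List.bisectRight_spec sL s hp
  obtain ⟨hl_le, hl_lt, hl_ge⟩ := PySem.List.bisectLeft_spec sL e hp
  constructor
  · intro h
    have hrlen : PySem.List.bisectRight sL s < sL.length := lt_of_lt_of_le h hl_le
    refine ⟨sL[PySem.List.bisectRight sL s], ?_, ?_, ?_⟩
    · exact (PySem.List.mem_sorted L (fun x => x) false _).1 (List.getElem_mem _)
    · exact hr_ge _ hrlen le_rfl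
    · exact hl_lt _ hrlen h
  · rintro ⟨x, hxL, hsx, hxe⟩
    have hxsL : x ∈ sL := (PySem.List.mem_sorted L (fun x => x) false x).2 hxL
    obtain ⟨j, hj, rfl⟩ := List.getElem_of_mem hxsL
    have h1 : PySem.List.bisectRight sL s ≤ j := by
      by_contra hlt
      have h := hr_lt j hj (by omega)
      omega
    have h2 : j < PySem.List.bisectLeft sL e := by
      by_contra hge
      have h := hl_ge j hj (by omega)
      omega
    omega

theorem pv_slotF_eq_some_iff (m : List Int) (hm : m.Pairwise (· ≤ ·)) (x : Int) (i : Nat)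
    (hi : i + 1 < m.length) :
    pvSlotF m x = some i ↔ m[i] < x ∧ x < m[i + 1] := by
  obtain ⟨hle, hlt, hge⟩ := PySem.List.bisectLeft_spec m x hm
  unfold pvSlotF
  constructor
  · intro h
    by_cases hc : 0 < PySem.List.bisectLeft m x ∧ PySem.List.bisectLeft m x < m.length ∧
        PySem.List.pyGetD m (PySem.List.bisectLeft m x : Int) 0 ≠ x
    · rw [if_pos hc] at h
      have hbi : PySem.List.bisectLeft m x = i + 1 := by
        have := Option.some_injective _ h
        omega
      obtain ⟨h0, hlen, hne⟩ := hc
      rw [PySem.List.pyGetD_natCast, List.getD_eq_getElem m 0 hlen] at hne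
      constructor
      · exact hlt i (by omega) (by omega)
      · have hx1 : x ≤ m[i + 1] := by
          have := hge (i + 1) (by omega) (by omega)
          exact this
        have hne' : m[i + 1] ≠ x := by simpa only [hbi] using hne
        omega
    · rw [if_neg hc] at h; cases h
  · rintro ⟨h1, h2⟩
    have hbi : PySem.List.bisectLeft m x = i + 1 := by
      have ha : i < PySem.List.bisectLeft m x := by
        by_contra hge'
        have := hge i (by omega) (by omega)
        omega
      have hb : ¬ (i + 1 < PySem.List.bisectLeft m x) := by
        intro hlt'
        have := hlt (i + 1) (by omega) (by omega)
        omega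
      omega
    have hc : 0 < PySem.List.bisectLeft m x ∧ PySem.List.bisectLeft m x < m.length ∧
        PySem.List.pyGetD m (PySem.List.bisectLeft m x : Int) 0 ≠ x := by
      refine ⟨by omega, by omega, ?_⟩
      rw [PySem.List.pyGetD_natCast, List.getD_eq_getElem m 0 (by omega)]
      simp only [hbi]
      omega
    rw [if_pos hc]
    simp [hbi]

theorem pv_slotF_lt (m : List Int) (x : Int) (j : Nat) (h : pvSlotF m x = some j) :
    j + 1 < m.length := by
  unfold pvSlotF at h
  by_cases hc : 0 < PySem.List.bisectLeft m x ∧ PySem.List.bisectLeft m x < m.length ∧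
      PySem.List.pyGetD m (PySem.List.bisectLeft m x : Int) 0 ≠ x
  · rw [if_pos hc] at h
    have := Option.some_injective _ h
    omega
  · rw [if_neg hc] at h; cases h

theorem pv_core (m : List Int) (hm : m.Pairwise (· ≤ ·)) (L : List Int) :
    ((List.range (m.length - 1)).countP (fun (i : Nat) =>
        decide (PySem.List.bisectRight (PySem.List.sorted L (fun x => x)) (PySem.List.pyGetD m (i : Int) 0) <
                PySem.List.bisectLeft (PySem.List.sorted L (fun x => x)) ((PySem.List.pyGetD m ((i : Int) + 1) 0)))) : Int)
      = ((PySem.Set.ofList (L.filterMap (pvSlotF m))).length : Int) := by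
  have hiff : ∀ i ∈ List.range (m.length - 1),
      ((fun (i : Nat) =>
        decide (PySem.List.bisectRight (PySem.List.sorted L (fun x => x)) (PySem.List.pyGetD m (i : Int) 0) <
                PySem.List.bisectLeft (PySem.List.sorted L (fun x => x)) ((PySem.List.pyGetD m ((i : Int) + 1) 0)))) i = true
      ↔ (fun (i : Nat) => decide (i ∈ L.filterMap (pvSlotF m))) i = true) := by
    intro i hi
    have hi' : i < m.length - 1 := List.mem_range.1 hi
    have h1 : i + 1 < m.length := by omega
    simp only [decide_eq_true_iff]
    have e1 : PySem.List.pyGetD m (i : Int) 0 = m[i] := by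
      rw [PySem.List.pyGetD_natCast, List.getD_eq_getElem m 0 (by omega)]
    have e2 : PySem.List.pyGetD m ((i : Int) + 1) 0 = m[i + 1] := by
      have hcast : ((i : Int) + 1) = ((i + 1 : Nat) : Int) := by push_cast; ring
      rw [hcast, PySem.List.pyGetD_natCast, List.getD_eq_getElem m 0 h1]
    rw [e1, e2, pv_condA_iff]
    constructor
    · rintro ⟨x, hx, h3, h4⟩
      exact List.mem_filterMap.2 ⟨x, hx, (pv_slotF_eq_some_iff m hm x i h1).2 ⟨h3, h4⟩⟩
    · intro hmem
      obtain ⟨x, hx, hs⟩ := List.mem_filterMap.1 hmem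
      have hin := (pv_slotF_eq_some_iff m hm x i h1).1 hs
      exact ⟨x, hx, hin.1, hin.2⟩
  rw [List.countP_congr hiff]
  have h2 : (List.range (m.length - 1)).countP (fun i => decide (i ∈ L.filterMap (pvSlotF m)))
      = (PySem.Set.ofList (L.filterMap (pvSlotF m))).length := by
    rw [List.countP_eq_length_filter]
    have hnd1 : ((List.range (m.length - 1)).filter (fun i => decide (i ∈ L.filterMap (pvSlotF m)))).Nodup :=
      (List.nodup_range).filter _
    have hnd2 := PySem.Set.nodup_ofList (L.filterMap (pvSlotF m))
    have hperm : ((List.range (m.length - 1)).filter (fun i => decide (i ∈ L.filterMap (pvSlotF m)))).Perm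
        (PySem.Set.ofList (L.filterMap (pvSlotF m))) := by
      rw [List.perm_ext_iff_of_nodup hnd1 hnd2]
      intro a
      simp only [List.mem_filter, List.mem_range, decide_eq_true_iff, PySem.Set.mem_ofList]
      constructor
      · rintro ⟨_, h⟩; exact h
      · intro h
        refine ⟨?_, h⟩
        obtain ⟨x, hx, hs⟩ := List.mem_filterMap.1 h
        have := pv_slotF_lt m x a hs
        omega
    exact hperm.length_eq
  exact_mod_cast h2
-- the two ports agree on every input (A is total, so no Pre_ is needed)
theorem pv_main (ets : List (String × String × Int)) (its : List Int) :
    filter_early_errors ets its = filter_early_errors_alt ets its := by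
  by_cases h : its = []
  · simp [filter_early_errors, filter_early_errors_alt, h]
  · simp only [filter_early_errors, filter_early_errors_alt, count_intervals_with_pattern,
      if_neg h]
    set m := PySem.List.sorted its (fun x => x) with hm
    set pd := List.foldl (fun d t => d.modify t.2.1 [] fun l => l ++ [t.2.2])
      PySem.Dict.empty ets with hpd
    have hmp : m.Pairwise (· ≤ ·) := by
      simpa using PySem.List.sorted_pairwise its (fun x => x)
    have hkeys : pd.keys = PySem.Set.ofList (ets.map fun t => t.2.1) := by
      rw [hpd]
      have hh := PySem.Dict.keys_foldl_modify_key ets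
        (fun t : String × String × Int => t.2.1) ([] : List Int)
        (fun _ t l => l ++ [t.2.2]) PySem.Dict.empty
      simpa [PySem.Dict.keys, PySem.Set.update_empty] using hh
    have hnodup : pd.keys.Nodup := by rw [hkeys]; exact PySem.Set.nodup_ofList _
    set r0 := List.foldl (fun d k => d.insert k (0 : Int)) PySem.Dict.empty pd.keys with hr0
    have hitems0 : r0.items = pd.keys.map (fun k => (k, (0 : Int))) := by
      rw [hr0]
      simpa using PySem.Dict.items_foldl_insert_fresh pd.keys (fun a => a)
        (fun _ => (0 : Int)) PySem.Dict.empty (fun a _ => rfl) (by simpa using hnodup)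
    have hkeys0 : r0.keys = pd.keys := by
      simp [PySem.Dict.keys, hitems0]
    have hmem0 : ∀ pr ∈ pd.items, pr.1 ∈ r0.keys := fun pr hpr => by
      rw [hkeys0]; exact PySem.Dict.mem_keys_of_mem_items pd hpr
    have hRfull := (pv_outerA_keys m pd.items (List.range (m.length - 1)) r0 hmem0).trans hkeys0
    have hRnodup := hRfull.symm ▸ hnodup
    rw [PySem.Dict.items_eq_map_keys _ hRnodup 0, hRfull]
    set slots := List.foldl
      (fun (d : PySem.Dict String (PySem.Set Nat)) (t : String × String × Int) =>
        if 0 < PySem.List.bisectLeft m t.2.2 ∧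
            PySem.List.bisectLeft m t.2.2 < m.length ∧
            PySem.List.pyGetD m ((PySem.List.bisectLeft m t.2.2 : Nat) : Int) 0 ≠ t.2.2 then
          (d.setdefault t.2.1 PySem.Set.empty).modify t.2.1 PySem.Set.empty fun s =>
            s.add (PySem.List.bisectLeft m t.2.2 - 1)
        else d.setdefault t.2.1 PySem.Set.empty)
      PySem.Dict.empty ets with hslots
    have hskeys : slots.keys = PySem.Set.ofList (ets.map fun t => t.2.1) := by
      rw [hslots]
      simpa [PySem.Dict.keys, PySem.Set.update_empty] using
        pv_bslots_keys m ets PySem.Dict.empty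
    have hsnodup : slots.keys.Nodup := by rw [hskeys]; exact PySem.Set.nodup_ofList _
    rw [PySem.Dict.items_eq_map_keys _ hsnodup PySem.Set.empty, hskeys, List.map_map, hkeys]
    apply List.map_congr_left
    intro k hk
    simp only [Function.comp]
    have hkmem : k ∈ pd.keys := by rw [hkeys]; exact hk
    have h0 : r0.getD k 0 = 0 := by
      rw [hr0]; exact pv_init_getD pd.keys k PySem.Dict.empty (fun k' => rfl)
    have hLk : pd.getD k [] = (ets.filter (fun t => t.2.1 == k)).map (fun t => t.2.2) := by
      rw [hpd]; simpa using pv_emap_getD ets k PySem.Dict.empty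
    have hitemsPd := PySem.Dict.items_eq_map_keys pd hnodup ([] : List Int)
    have hsval : slots.getD k PySem.Set.empty
        = PySem.Set.ofList (((ets.filter (fun t => t.2.1 == k)).map (fun t => t.2.2)).filterMap (pvSlotF m)) := by
      rw [hslots]
      simpa [PySem.Set.update_empty] using pv_bslots_getD m ets k PySem.Dict.empty
    rw [pv_outerA m pd.items k (List.range (m.length - 1)) r0, h0, zero_add]
    have hmapeq : (List.range (m.length - 1)).map (fun (i : Nat) =>
        ((pd.items.countP (fun pr => pr.1 == k &&
          decide (PySem.List.bisectRight (PySem.List.sorted pr.2 (fun x => x)) (PySem.List.pyGetD m (i : Int) 0) <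
                  PySem.List.bisectLeft (PySem.List.sorted pr.2 (fun x => x)) ((PySem.List.pyGetD m ((i : Int) + 1) 0))))) : Int))
      = (List.range (m.length - 1)).map (fun (i : Nat) =>
          if (decide (PySem.List.bisectRight (PySem.List.sorted (pd.getD k []) (fun x => x)) (PySem.List.pyGetD m (i : Int) 0) <
                  PySem.List.bisectLeft (PySem.List.sorted (pd.getD k []) (fun x => x)) ((PySem.List.pyGetD m ((i : Int) + 1) 0)))) = true then (1 : Int) else 0) := by
      refine List.map_congr_left (fun i hi => ?_)
      rw [hitemsPd, List.countP_map]
      simp only [Function.comp_def]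
      rw [pv_countP_nodup pd.keys k (fun a =>
          decide (PySem.List.bisectRight (PySem.List.sorted (pd.getD a []) (fun x => x)) (PySem.List.pyGetD m (i : Int) 0) <
                  PySem.List.bisectLeft (PySem.List.sorted (pd.getD a []) (fun x => x)) ((PySem.List.pyGetD m ((i : Int) + 1) 0)))) hnodup hkmem]
      simp
    rw [hmapeq, PySem.List.sum_map_ite_one_zero, pv_core m hmp (pd.getD k []), hsval, hLk]
    rfl

-- ===== VERDICT (by name: the statement is the Claim_ definition above) =====
theorem filter_early_errors_spec : Claim_equal_filter_early_errors := by
  intro ets its _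
  exact pv_main ets its
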